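-- pv_equiv track=rewrite | github.com/Maxkile/techno | src/ReverseListPrint.py | getColLen
-- ===== SOURCE A (Python) =====
-- def getColLen(v,cols):
--     col_len_lst = list()
--     col_len = 0
--     for i in range(0,cols):
--         for j in range(i,len(v),cols):
--             col_len += 1
--         col_len_lst.append(col_len)
--         col_len = 0
--     return tuple(col_len_lst)
-- ===== SOURCE B (Python) =====
-- def getColLen(v, cols):
--     n = len(v)
--     return tuple((n - i + cols - 1) // cols for i in range(cols))
-- ===== Notes on version B (the rewrite author's own statement) =====
-- stated objective: simpler
-- what changed: Replaces the nested loops that count each column's elements one by one with the closed-form ceiling division ceil((len(v)-i)/cols) per column.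
import Mathlib
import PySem

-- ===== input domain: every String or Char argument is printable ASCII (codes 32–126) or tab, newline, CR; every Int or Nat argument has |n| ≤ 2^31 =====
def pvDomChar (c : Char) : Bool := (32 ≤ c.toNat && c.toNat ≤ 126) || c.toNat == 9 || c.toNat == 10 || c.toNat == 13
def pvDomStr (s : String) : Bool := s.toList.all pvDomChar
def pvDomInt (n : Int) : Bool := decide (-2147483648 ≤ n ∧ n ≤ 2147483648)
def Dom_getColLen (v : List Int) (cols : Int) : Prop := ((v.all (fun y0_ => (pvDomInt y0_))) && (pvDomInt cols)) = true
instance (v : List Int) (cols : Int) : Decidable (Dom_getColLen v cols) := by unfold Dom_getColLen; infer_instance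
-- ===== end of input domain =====

-- B: closed-form ceiling division per column instead of A's element-by-element counting loops (simpler).
-- ===== PORT A =====
def getColLen (v : List Int) (cols : Int) : List Int :=
  (PySem.List.pyRange 0 cols 1).foldl
    (fun col_len_lst i =>
      let col_len := (PySem.List.pyRange i (v.length : Int) cols).foldl (fun c _ => c + 1) 0
      col_len_lst ++ [col_len]) []

-- ===== PORT B =====
def getColLen_alt (v : List Int) (cols : Int) : List Int :=
  (PySem.List.pyRange 0 cols 1).map
    (fun i => PySem.Int.floordiv ((v.length : Int) - i + cols - 1) cols)

-- ===== PRECONDITION & SPEC =====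
def Spec_getColLen (v : List Int) (cols : Int) (out : List Int) : Prop := out = getColLen_alt v cols
instance (v : List Int) (cols : Int) (out : List Int) : Decidable (Spec_getColLen v cols out) := by unfold Spec_getColLen; infer_instance

-- ===== CLAIM (what is proved, stated in full; the proofs are below) =====
def Claim_equal_getColLen : Prop := ∀ (v : List Int) (cols : Int), Dom_getColLen v cols → Spec_getColLen v cols (getColLen v cols)

-- ===== LEMMAS AND PROOFS =====

-- ===== VERDICT (by name: the statement is the Claim_ definition above) =====
-- counting loop over a list is its length
lemma foldl_count_len (l : List Int) (c : Int) :
    l.foldl (fun c _ => c + 1) c = c + l.length := by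
  induction l generalizing c with
  | nil => simp
  | cons x xs ih => simp [List.foldl, ih]; omega

lemma col_count_eq (v : List Int) (cols i : Int) (hc : 0 < cols)
    (h0 : 0 ≤ i) (hi : i < cols) :
    (PySem.List.pyRange i (v.length : Int) cols).foldl (fun c _ => c + 1) 0
      = PySem.Int.floordiv ((v.length : Int) - i + cols - 1) cols := by
  rw [foldl_count_len, PySem.List.pyRange_of_pos _ _ hc,
      PySem.Int.floordiv_eq_ediv_of_pos hc]
  simp only [List.length_map, List.length_range, zero_add]
  by_cases h : i < (v.length : Int)
  · simp only [if_pos h]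
    have hnn : 0 ≤ ((v.length : Int) - i + cols - 1) / cols :=
      Int.ediv_nonneg (by omega) (by omega)
    omega
  · simp only [if_neg h]
    have : ((v.length : Int) - i + cols - 1) / cols = 0 :=
      Int.ediv_eq_zero_of_lt (by omega) (by omega)
    omega

theorem getColLen_spec : Claim_equal_getColLen := by
  intro v cols _
  unfold Spec_getColLen getColLen getColLen_alt
  rw [PySem.List.foldl_append_singleton_eq_map]
  simp only [List.nil_append]
  apply List.map_congr_left
  intro i hi
  rcases PySem.List.mem_pyRange_one.mp hi with ⟨h0, hlt⟩
  exact col_count_eq v cols i (lt_of_le_of_lt h0 hlt) h0 hlt
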